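-- pv_equiv track=rewrite | github.com/satyasashi/DSA-Kunal---Python | Algorithms/Binary_Search/order_agnoistic_binary_search.py | order_agnoistic_binary_search
-- ===== SOURCE A (Python) =====
-- def order_agnoistic_binary_search(arr, target):
--     # Base case: arr is empty
--     if len(arr) == 0:
--         return None
--
--     start = 0
--     end = len(arr) - 1
--
--     # Find if the given array is Asc or Desc
--     is_ascending = arr[start] < arr[end]
--
--     while start <= end:
--         # (start + end) // 2 at some point when we do
--         # (start + end) might exceed integer limit.
--         # Doing start + (end - start) // 2 is optmized way.
--         mid = start + (end - start) // 2
--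
--         if target == arr[mid]:
--             return mid
--
--         if is_ascending:
--             if target > arr[mid]:
--                 start = mid + 1
--             elif target < arr[mid]:
--                 end = mid - 1
--         else:
--             if target > arr[mid]:
--                 end = mid - 1
--             elif target < arr[mid]:
--                 start = mid + 1
--
--     return None
-- ===== SOURCE B (Python) =====
-- def order_agnoistic_binary_search(arr, target):
--     if not arr:
--         return None
--     is_ascending = arr[0] < arr[-1]
--
--     def go(start, end):
--         if start > end:
--             return None
--         mid = start + (end - start) // 2
--         if target == arr[mid]:
--             return mid
--         if (target > arr[mid]) == is_ascending:
--             return go(mid + 1, end)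
--         return go(start, mid - 1)
--
--     return go(0, len(arr) - 1)
-- ===== Notes on version B (the rewrite author's own statement) =====
-- stated objective: alternative
-- what changed: Replaces A's while-loop with mutable start/end and four direction/comparison branches by a recursive helper closed over the array, target and the once-computed direction, whose branch choice is a single boolean equation (target > arr[mid]) == is_ascending.
import Mathlib
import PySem

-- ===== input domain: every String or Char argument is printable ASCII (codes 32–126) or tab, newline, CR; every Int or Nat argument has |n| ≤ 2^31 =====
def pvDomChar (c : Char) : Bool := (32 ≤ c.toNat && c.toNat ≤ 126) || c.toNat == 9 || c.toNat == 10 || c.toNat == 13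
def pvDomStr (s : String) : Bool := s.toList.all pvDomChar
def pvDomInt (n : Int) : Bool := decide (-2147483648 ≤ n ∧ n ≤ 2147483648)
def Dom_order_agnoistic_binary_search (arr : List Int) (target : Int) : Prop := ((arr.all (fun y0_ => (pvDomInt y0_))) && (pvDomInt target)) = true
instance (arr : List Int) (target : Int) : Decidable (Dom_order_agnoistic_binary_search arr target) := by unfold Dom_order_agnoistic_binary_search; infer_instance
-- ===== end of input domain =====

-- B replaces A's while-loop (mutable start/end, four direction/comparison branches) by a
-- recursive helper with the direction fixed once; same return value, no side effects.

-- B replaces A's while-loop (mutable start/end, four direction/comparison branches) by a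
-- recursive helper with the direction fixed once; same return value, no side effects.

-- ===== PORT A =====
-- A's while-loop as recursion on (start, stop); branches in A's order. 'fuel' is only a
-- totality guard: the interval shrinks each iteration, so fuel = len(arr)+1 is never exhausted.
def oabsLoop (arr : List Int) (target : Int) (isAscending : Bool) : Nat → Int → Int → Option Int
  | 0, _, _ => none  -- fuel exhausted: unreachable from the top-level call
  | fuel + 1, start, stop =>
    if start ≤ stop then
      let mid := start + PySem.Int.floordiv (stop - start) 2
      match PySem.List.pyGet? arr mid with
      | none => none  -- IndexError; unreachable: start ≤ mid ≤ stop are valid indices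
      | some v =>
        if target == v then some mid
        else if isAscending then
          if target > v then oabsLoop arr target isAscending fuel (mid + 1) stop
          else if target < v then oabsLoop arr target isAscending fuel start (mid - 1)
          else none  -- unreachable by trichotomy on Int (Python would loop forever)
        else
          if target > v then oabsLoop arr target isAscending fuel start (mid - 1)
          else if target < v then oabsLoop arr target isAscending fuel (mid + 1) stop
          else none  -- unreachable by trichotomy on Int
    else none

def order_agnoistic_binary_search (arr : List Int) (target : Int) : Option Int :=
  if arr.length == 0 then none
  else
    let start : Int := 0
    let stop : Int := (arr.length : Int) - 1
    match PySem.List.pyGet? arr start, PySem.List.pyGet? arr stop with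
    | some aStart, some aStop =>
        oabsLoop arr target (decide (aStart < aStop)) (arr.length + 1) start stop
    | _, _ => none  -- unreachable: arr nonempty, 0 and len-1 in range

-- ===== PORT B =====
-- Source B's inner recursive helper go(start, end); direction passed once; same fuel guard.
def oabsGo (arr : List Int) (target : Int) (isAscending : Bool) : Nat → Int → Int → Option Int
  | 0, _, _ => none  -- fuel exhausted: unreachable from the top-level call
  | fuel + 1, start, stop =>
    if start > stop then none
    else
      let mid := start + PySem.Int.floordiv (stop - start) 2
      match PySem.List.pyGet? arr mid with
      | none => none  -- IndexError; unreachable for in-range bounds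
      | some v =>
        if target == v then some mid
        else if decide (target > v) == isAscending then oabsGo arr target isAscending fuel (mid + 1) stop
        else oabsGo arr target isAscending fuel start (mid - 1)

def order_agnoistic_binary_search_alt (arr : List Int) (target : Int) : Option Int :=
  match arr with
  | [] => none
  | a0 :: _ =>
    match PySem.List.pyGet? arr (-1) with
    | none => none  -- unreachable: arr nonempty
    | some aLast =>
      oabsGo arr target (decide (a0 < aLast)) (arr.length + 1) 0 ((arr.length : Int) - 1)

-- ===== PRECONDITION & SPEC =====
def Spec_order_agnoistic_binary_search (arr : List Int) (target : Int) (out : Option Int) : Prop := out = order_agnoistic_binary_search_alt arr target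
instance (arr : List Int) (target : Int) (out : Option Int) : Decidable (Spec_order_agnoistic_binary_search arr target out) := by unfold Spec_order_agnoistic_binary_search; infer_instance

-- ===== CLAIM (what is proved, stated in full; the proofs are below) =====
def Claim_equal_order_agnoistic_binary_search : Prop := ∀ (arr : List Int) (target : Int), Dom_order_agnoistic_binary_search arr target → Spec_order_agnoistic_binary_search arr target (order_agnoistic_binary_search arr target)

-- ===== LEMMAS AND PROOFS =====

lemma loop_eq_go (arr : List Int) (target : Int) (asc : Bool) :
    ∀ (fuel : Nat) (start stop : Int),
      oabsLoop arr target asc fuel start stop = oabsGo arr target asc fuel start stop := by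
  intro fuel
  induction fuel with
  | zero => intro start stop; rfl
  | succ k ih =>
    intro start stop
    rw [oabsLoop, oabsGo]
    by_cases hle : start ≤ stop
    · simp only [hle, if_true, show ¬ start > stop by omega, if_false]
      set mid := start + PySem.Int.floordiv (stop - start) 2 with hmid
      cases hg : PySem.List.pyGet? arr mid with
      | none => simp
      | some v =>
        simp only []
        by_cases heq : target == v
        · simp [heq]
        · have hne : target ≠ v := by simpa using heq
          simp only [heq, if_false]
          cases asc with
          | true =>
            by_cases hgt : target > v
            · simp [hgt, ih]
            · have hlt : target < v := by omega
              simp [hgt, hlt, ih]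
          | false =>
            by_cases hgt : target > v
            · simp [hgt, ih]
            · have hlt : target < v := by omega
              simp [hgt, hlt, ih]
    · simp [hle, show start > stop by omega]

theorem order_agnoistic_binary_search_spec : Claim_equal_order_agnoistic_binary_search := by
  intro arr target _hdom
  unfold Spec_order_agnoistic_binary_search order_agnoistic_binary_search order_agnoistic_binary_search_alt
  cases arr with
  | nil => simp
  | cons a0 rest =>
    simp only [List.length_cons]
    have hlast : PySem.List.pyGet? (a0 :: rest) (((rest.length + 1 : Nat) : Int) - 1) =
        (a0 :: rest).getLast? := by
      have he : (((rest.length + 1 : Nat) : Int) - 1) = ((rest.length : Nat) : Int) := by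
        push_cast; ring
      rw [he, PySem.List.pyGet?_natCast, List.getLast?_eq_getElem?]
      simp
    have hsome : ∃ l, (a0 :: rest).getLast? = some l := by
      cases h : (a0 :: rest).getLast? with
      | none => simp at h
      | some l => exact ⟨l, rfl⟩
    obtain ⟨l, hl⟩ := hsome
    rw [hl] at hlast
    have hneg : PySem.List.pyGet? (a0 :: rest) (-1) = some l := by
      rw [PySem.List.pyGet?_neg_one, hl]
    have h0 : PySem.List.pyGet? (a0 :: rest) 0 = some a0 := PySem.List.pyGet?_zero_cons a0 rest
    simp only [h0, hneg, hlast]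
    have hlen : (((rest.length + 1 : Nat)) == 0) = false := by simp
    simp only [hlen, Bool.false_eq_true, if_false]
    push_cast
    exact loop_eq_go _ _ _ _ _ _
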